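-- pv_equiv track=rewrite | github.com/thingswise/tw-ml-sdk-python | twml/template.py | parse_def
-- ===== SOURCE A (Python) =====
-- def parse_def(d):
--     result = []
--     i = d.find("{")
--     s = 0
--     while i != -1:
--         result.append(d[s:i])
--         j = d.find("}", i+1)
--         if j == -1:
--             raise ValueError("Invalid key def: %s" % d)
--         else:
--             n = d[i+1:j]
--             result.append(n)
--             s = j+1
--             i = d.find("{", s)
--     result.append(d[s:])
--     return result
-- ===== SOURCE B (Python) =====
-- def parse_def(d):
--     result = []
--     buf = []
--     inside = False
--     for c in d:
--         if inside:
--             if c == '}':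
--                 result.append(''.join(buf))
--                 buf = []
--                 inside = False
--             else:
--                 buf.append(c)
--         else:
--             if c == '{':
--                 result.append(''.join(buf))
--                 buf = []
--                 inside = True
--             else:
--                 buf.append(c)
--     if inside:
--         raise ValueError("Invalid key def: %s" % d)
--     result.append(''.join(buf))
--     return result
-- ===== Notes on version B (the rewrite author's own statement) =====
-- stated objective: alternative
-- what changed: Replaces the while-loop over str.find indices and slicing with a single-pass character state machine (buffer + inside-brace flag).
import Mathlib
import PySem

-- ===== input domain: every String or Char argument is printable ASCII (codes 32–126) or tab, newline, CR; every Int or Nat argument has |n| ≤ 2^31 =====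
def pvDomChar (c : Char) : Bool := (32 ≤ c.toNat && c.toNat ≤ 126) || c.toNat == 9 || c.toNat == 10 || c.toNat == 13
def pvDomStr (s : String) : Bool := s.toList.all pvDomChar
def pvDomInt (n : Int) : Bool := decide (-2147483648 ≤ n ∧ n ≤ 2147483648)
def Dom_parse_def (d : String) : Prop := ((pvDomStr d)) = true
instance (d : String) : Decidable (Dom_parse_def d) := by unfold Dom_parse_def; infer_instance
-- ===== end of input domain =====

-- B replaces A's while-loop over str.find indices with a single-pass character state machine; same cost, different decomposition.
-- Both programs raise ValueError on an unterminated '{'; those inputs are excluded by Pre_parse_def.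

-- ===== PORT A =====
-- A's while loop: s is the scan position; here each iteration works on the suffix l = d[s:],
-- d.find("{", s) / d.find("}", i+1) become findIdx? on the suffix and slices become take/drop.
-- On the raise path (no '}' after a found '{') Python raises; this port returns the partial result built so far.
def parseALoop (l : List Char) : List String :=
  match hi : l.findIdx? (· = '{') with
  | none => [l.asString]
  | some i =>
    match hj : (l.drop (i+1)).findIdx? (· = '}') with
    | none => [(l.take i).asString]  -- Python: raise ValueError
    | some j =>
        (l.take i).asString :: ((l.drop (i+1)).take j).asString ::
          parseALoop ((l.drop (i+1)).drop (j+1))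
termination_by l.length
decreasing_by
  have h1 : i < l.length := List.findIdx?_eq_some_iff_findIdx_eq.mp hi |>.1
  simp [List.length_drop]
  omega

def parse_def (d : String) : List String := parseALoop d.toList

-- ===== PORT B =====
-- state machine: result accumulator, current buffer, inside-brace flag, one pass over the characters.
-- On the raise path (end of input while inside a brace) Python raises; this port returns the accumulator.
def parseBLoop (acc : List String) (buf : List Char) (inside : Bool) : List Char → List String
  | [] => if inside then acc else acc ++ [buf.asString]  -- Python: raise ValueError when inside
  | c :: cs =>
    if inside then
      if c = '}' then parseBLoop (acc ++ [buf.asString]) [] false cs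
      else parseBLoop acc (buf ++ [c]) true cs
    else
      if c = '{' then parseBLoop (acc ++ [buf.asString]) [] true cs
      else parseBLoop acc (buf ++ [c]) false cs

def parse_def_alt (d : String) : List String := parseBLoop [] [] false d.toList

-- ===== PRECONDITION & SPEC =====
-- Pre_ excludes exactly the inputs on which Python A raises ValueError (some '{' with no '}' after it);
-- Python B raises there as well.
def Pre_parse_def (d : String) : Prop :=
  ∀ i : Nat, i < d.toList.length → d.toList[i]? = some '{' → '}' ∈ d.toList.drop (i+1)
instance (d : String) : Decidable (Pre_parse_def d) := by unfold Pre_parse_def; infer_instance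
def pvWitness_parse_def : String := "a{key}b"

def Spec_parse_def (d : String) (out : List String) : Prop := out = parse_def_alt d
instance (d : String) (out : List String) : Decidable (Spec_parse_def d out) := by unfold Spec_parse_def; infer_instance

-- ===== CLAIM (what is proved, stated in full; the proofs are below) =====
def Claim_equal_parse_def : Prop := ∀ (d : String), Dom_parse_def d → Pre_parse_def d → Spec_parse_def d (parse_def d)

-- ===== LEMMAS AND PROOFS =====

theorem parseBLoop_acc (cs : List Char) :
    ∀ (acc : List String) (buf : List Char) (inside : Bool),
      parseBLoop acc buf inside cs = acc ++ parseBLoop [] buf inside cs := by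
  induction cs with
  | nil => intro acc buf inside; cases inside <;> simp [parseBLoop]
  | cons c cs ih =>
    intro acc buf inside
    cases inside
    · simp only [parseBLoop, Bool.false_eq_true, if_false]
      by_cases hc : c = '{'
      · rw [if_pos hc, if_pos hc, ih, ih ([] ++ [buf.asString])]
        simp
      · rw [if_neg hc, if_neg hc, ih]
    · simp only [parseBLoop, if_true]
      by_cases hc : c = '}'
      · rw [if_pos hc, if_pos hc, ih, ih ([] ++ [buf.asString])]
        simp
      · rw [if_neg hc, if_neg hc, ih]

theorem parseBLoop_outside (cs : List Char) :
    ∀ (buf : List Char),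
      parseBLoop [] buf false cs =
        match cs.findIdx? (· = '{') with
        | none => [(buf ++ cs).asString]
        | some i => (buf ++ cs.take i).asString :: parseBLoop [] [] true (cs.drop (i+1))
    := by
  induction cs with
  | nil => intro buf; simp [parseBLoop]
  | cons c cs ih =>
    intro buf
    by_cases hc : c = '{'
    · subst hc
      have h1 : parseBLoop [] buf false ('{' :: cs)
          = parseBLoop ([] ++ [buf.asString]) [] true cs := rfl
      rw [h1, parseBLoop_acc cs, List.findIdx?_cons]
      simp
    · have h1 : parseBLoop [] buf false (c :: cs)
          = parseBLoop [] (buf ++ [c]) false cs := by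
        conv_lhs => rw [parseBLoop]
        simp [hc]
      rw [h1, ih, List.findIdx?_cons]
      simp only [hc, decide_false, if_false, Bool.false_eq_true]
      cases h : cs.findIdx? (· = '{') <;> simp [List.append_assoc]

theorem parseBLoop_inside (cs : List Char) :
    ∀ (buf : List Char),
      parseBLoop [] buf true cs =
        match cs.findIdx? (· = '}') with
        | none => []
        | some j => (buf ++ cs.take j).asString :: parseBLoop [] [] false (cs.drop (j+1))
    := by
  induction cs with
  | nil => intro buf; simp [parseBLoop]
  | cons c cs ih =>
    intro buf
    by_cases hc : c = '}'
    · subst hc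
      have h1 : parseBLoop [] buf true ('}' :: cs)
          = parseBLoop ([] ++ [buf.asString]) [] false cs := rfl
      rw [h1, parseBLoop_acc cs, List.findIdx?_cons]
      simp
    · have h1 : parseBLoop [] buf true (c :: cs)
          = parseBLoop [] (buf ++ [c]) true cs := by
        conv_lhs => rw [parseBLoop]
        simp [hc]
      rw [h1, ih, List.findIdx?_cons]
      simp only [hc, decide_false, if_false, Bool.false_eq_true]
      cases h : cs.findIdx? (· = '}') <;> simp [List.append_assoc]

theorem parseALoop_eq (l : List Char) : parseALoop l = parseBLoop [] [] false l := by
  rw [parseALoop, parseBLoop_outside]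
  split
  · next hi => rw [hi]; simp
  · next i hi =>
      rw [hi]
      simp only []
      rw [parseBLoop_inside]
      split
      · next hj => rw [hj]; simp
      · next j hj =>
          rw [hj, parseALoop_eq ((l.drop (i+1)).drop (j+1))]
          simp
termination_by l.length
decreasing_by
  rename_i i h1 h2 h3 j g1 g2 g3
  have hi : i < l.length := (List.findIdx?_eq_some_iff_findIdx_eq.mp h3).1
  simp only [List.length_drop]
  omega

-- ===== VERDICT (by name: the statement is the Claim_ definition above) =====
theorem parse_def_spec : Claim_equal_parse_def := by
  intro d _ _
  unfold Spec_parse_def parse_def parse_def_alt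
  exact parseALoop_eq d.toList
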